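-- pv_equiv track=rewrite | github.com/alegleason/CrackingTheTechnicalInterview | DynamicProgramming/DP.py | climb_stairs_k_red
-- ===== SOURCE A (Python) =====
-- def climb_stairs_k_red(n, k, red_steps):
--     dp = [0] * k
--     dp[0] = 1
--     for i in range(1, n + 1):
--         # Apply the recurrence relation
--         for j in range(1, k):
--             if i - j < 0:
--                 # continue ignores next statements
--                 continue
--             # Check if current step is in non-valid steps
--             if i - 1 in red_steps:
--                 dp[i % k] = 0
--             else:
--                 dp[i % k] += dp[(i - j) % k]
--     return dp[n % k]
-- ===== SOURCE B (Python) =====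
-- def climb_stairs_k_red(n, k, red_steps):
--     # Rolling window sum over a forward dp array; forbidden steps in a set.
--     forbidden = set(red_steps)
--     ways = [0] * (n + 1)
--     ways[0] = 1
--     window = 0  # invariant before writing ways[i]: window == sum(ways[max(0, i - k) : i])
--     for i in range(1, n + 1):
--         window += ways[i - 1]
--         if i - k - 1 >= 0:
--             window -= ways[i - k - 1]
--         if i - 1 in forbidden:
--             ways[i] = 0
--         else:
--             ways[i] = window
--     return ways[n]
-- ===== Notes on version B (the rewrite author's own statement) =====
-- stated objective: faster
-- what changed: Replaces the ring-buffer double loop (k-1 inner iterations per step, each with a linear list-membership test) by a single forward pass keeping a rolling window sum of the last k dp values and a hash set of forbidden steps.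
-- intended difference: For k = 1 A's inner loop range(1,1) is empty, so A ignores red_steps entirely and returns 1 even when a forbidden step r with 0 <= r < n blocks the only path; B returns 0 there, the intended count. — e.g. on climb_stairs_k_red(2, 1, [0]): A returns 1, B returns 0
-- outside the precondition, e.g. on climb_stairs_k_red(-2, 2, set()): A returns 1, B raises IndexError
import Mathlib
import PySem

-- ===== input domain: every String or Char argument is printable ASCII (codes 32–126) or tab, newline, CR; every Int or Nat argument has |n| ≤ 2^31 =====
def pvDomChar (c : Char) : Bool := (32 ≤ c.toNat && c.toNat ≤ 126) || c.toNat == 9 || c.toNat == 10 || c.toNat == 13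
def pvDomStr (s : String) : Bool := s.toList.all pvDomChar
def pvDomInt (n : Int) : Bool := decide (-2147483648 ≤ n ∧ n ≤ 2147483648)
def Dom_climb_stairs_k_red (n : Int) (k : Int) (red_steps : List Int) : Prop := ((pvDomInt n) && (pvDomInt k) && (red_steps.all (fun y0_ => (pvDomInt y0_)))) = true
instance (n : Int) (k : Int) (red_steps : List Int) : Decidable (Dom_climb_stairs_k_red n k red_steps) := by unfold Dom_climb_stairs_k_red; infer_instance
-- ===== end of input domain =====

-- B replaces A's ring-buffer double loop by one pass with a rolling window sum and a set of
-- forbidden steps (measured faster, asymptotically fewer operations); for k = 1 (see D_ below)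
-- A ignores red_steps, B honours them.

-- ===== PORT A =====
-- inner loop body: 'for j in range(1, k): …'
def innerA (red_steps : List Int) (k : Int) (i : Int) (dp : List Int) (j : Int) : List Int :=
  if i - j < 0 then dp
  else if red_steps.contains (i - 1) then
    PySem.List.pySetD dp (PySem.Int.mod i k) 0
  else
    PySem.List.pySetD dp (PySem.Int.mod i k)
      (PySem.List.pyGetD dp (PySem.Int.mod i k) 0 + PySem.List.pyGetD dp (PySem.Int.mod (i - j) k) 0)

-- outer loop body: one iteration 'i' of 'for i in range(1, n + 1): …'
def outerA (red_steps : List Int) (k : Int) (dp : List Int) (i : Int) : List Int :=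
  (PySem.List.pyRange 1 k 1).foldl (innerA red_steps k i) dp

def climb_stairs_k_red (n : Int) (k : Int) (red_steps : List Int) : Int :=
  let dp := PySem.List.pySetD (PySem.List.pyRepeat [(0 : Int)] k) 0 1     -- dp = [0]*k; dp[0] = 1
  let dp := (PySem.List.pyRange 1 (n + 1) 1).foldl (outerA red_steps k) dp
  PySem.List.pyGetD dp (PySem.Int.mod n k) 0                              -- return dp[n % k]

-- ===== PORT B =====
-- loop body of B: window update, then write ways[i]
def stepB (forbidden : PySem.Set Int) (k : Int) (st : List Int × Int) (i : Int) : List Int × Int :=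
  let window := st.2 + PySem.List.pyGetD st.1 (i - 1) 0
  let window := if 0 ≤ i - k - 1 then window - PySem.List.pyGetD st.1 (i - k - 1) 0 else window
  if PySem.Set.contains forbidden (i - 1) then (PySem.List.pySetD st.1 i 0, window)
  else (PySem.List.pySetD st.1 i window, window)

def climb_stairs_k_red_alt (n : Int) (k : Int) (red_steps : List Int) : Int :=
  let forbidden : PySem.Set Int := PySem.Set.ofList red_steps              -- forbidden = set(red_steps)
  let ways := PySem.List.pySetD (PySem.List.pyRepeat [(0 : Int)] (n + 1)) 0 1  -- ways = [0]*(n+1); ways[0] = 1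
  let st := (PySem.List.pyRange 1 (n + 1) 1).foldl (stepB forbidden k) (ways, 0)
  PySem.List.pyGetD st.1 n 0                                               -- return ways[n]

-- ===== PRECONDITION & SPEC =====
-- Pre_ excludes k ≤ 0, where A raises IndexError, and negative n, outside the natural domain of
-- a stair count, where A returns a leftover ring-buffer cell and B raises IndexError.
def Pre_climb_stairs_k_red (n : Int) (k : Int) (red_steps : List Int) : Prop := 0 ≤ n ∧ 1 ≤ k
instance (n : Int) (k : Int) (red_steps : List Int) : Decidable (Pre_climb_stairs_k_red n k red_steps) := by
  unfold Pre_climb_stairs_k_red; infer_instance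
def pvWitness_climb_stairs_k_red : Int × Int × List Int := (3, 2, [1])

-- For k = 1 A's inner loop range(1,1) is empty, so A ignores red_steps and returns 1 even when a
-- forbidden step r with 0 ≤ r < n blocks the only path; B returns 0 there, the intended count.
def D_climb_stairs_k_red (n : Int) (k : Int) (red_steps : List Int) : Prop :=
  k = 1 ∧ ∃ r ∈ red_steps, 0 ≤ r ∧ r < n
instance (n : Int) (k : Int) (red_steps : List Int) : Decidable (D_climb_stairs_k_red n k red_steps) := by
  unfold D_climb_stairs_k_red; infer_instance

def Spec_climb_stairs_k_red (n : Int) (k : Int) (red_steps : List Int) (out : Int) : Prop :=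
  ¬ D_climb_stairs_k_red n k red_steps → out = climb_stairs_k_red_alt n k red_steps
instance (n : Int) (k : Int) (red_steps : List Int) (out : Int) : Decidable (Spec_climb_stairs_k_red n k red_steps out) := by
  unfold Spec_climb_stairs_k_red; infer_instance

def pvDiffWitness_climb_stairs_k_red : Int × Int × List Int := (2, 1, [0])
def pvDiffWitnessOut_climb_stairs_k_red : Int × Int := (1, 0)

-- ===== CLAIM (what is proved, stated in full; the proofs are below) =====
def Claim_unchanged_climb_stairs_k_red : Prop := ∀ (n : Int) (k : Int) (red_steps : List Int), Dom_climb_stairs_k_red n k red_steps → Pre_climb_stairs_k_red n k red_steps → Spec_climb_stairs_k_red n k red_steps (climb_stairs_k_red n k red_steps)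
def Claim_changed_climb_stairs_k_red : Prop := Dom_climb_stairs_k_red (pvDiffWitness_climb_stairs_k_red.1) (pvDiffWitness_climb_stairs_k_red.2.1) (pvDiffWitness_climb_stairs_k_red.2.2) ∧ Pre_climb_stairs_k_red (pvDiffWitness_climb_stairs_k_red.1) (pvDiffWitness_climb_stairs_k_red.2.1) (pvDiffWitness_climb_stairs_k_red.2.2) ∧ D_climb_stairs_k_red (pvDiffWitness_climb_stairs_k_red.1) (pvDiffWitness_climb_stairs_k_red.2.1) (pvDiffWitness_climb_stairs_k_red.2.2) ∧ climb_stairs_k_red (pvDiffWitness_climb_stairs_k_red.1) (pvDiffWitness_climb_stairs_k_red.2.1) (pvDiffWitness_climb_stairs_k_red.2.2) = pvDiffWitnessOut_climb_stairs_k_red.1 ∧ climb_stairs_k_red_alt (pvDiffWitness_climb_stairs_k_red.1) (pvDiffWitness_climb_stairs_k_red.2.1) (pvDiffWitness_climb_stairs_k_red.2.2) = pvDiffWitnessOut_climb_stairs_k_red.2 ∧ pvDiffWitnessOut_climb_stairs_k_red.1 ≠ pvDiffWitnessOut_climb_stairs_k_red.2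
def Claim_exact_climb_stairs_k_red : Prop := ∀ (n : Int) (k : Int) (red_steps : List Int), Dom_climb_stairs_k_red n k red_steps → Pre_climb_stairs_k_red n k red_steps → D_climb_stairs_k_red n k red_steps → climb_stairs_k_red n k red_steps ≠ climb_stairs_k_red_alt n k red_steps

-- ===== LEMMAS AND PROOFS =====

-- The common specification value: fRec k red m = [f m, f (m-1), …, f 0] where
-- f 0 = 1, f (i+1) = 0 if i ∈ red else sum of the last (up to) k values.
def fRec (k : Int) (red : List Int) : Nat → List Int
  | 0 => [1]
  | m + 1 => (if red.contains (m : Int) then 0 else ((fRec k red m).take k.toNat).sum) :: fRec k red m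

def fV (k : Int) (red : List Int) (m : Nat) : Int := (fRec k red m).headI

-- f extended to Int indices, 0 below 0
def gv (k : Int) (red : List Int) (j : Int) : Int := if j < 0 then 0 else fV k red j.toNat

-- gSum k red a u = Σ_{j=1..u} gv (a - j)
def gSum (k : Int) (red : List Int) (a : Int) : Nat → Int
  | 0 => 0
  | u + 1 => gSum k red a u + gv k red (a - (u + 1))

-- partial sums read by A's inner loop
def sAcc (dp : List Int) (a k : Int) : Nat → Int
  | 0 => 0
  | u + 1 => sAcc dp a k u + (if a - (u + 1) < 0 then 0 else PySem.List.pyGetD dp (PySem.Int.mod (a - (u + 1)) k) 0)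

theorem fRec_length (k : Int) (red : List Int) (m : Nat) : (fRec k red m).length = m + 1 := by
  induction m with
  | zero => rfl
  | succ m ih => simp [fRec, ih]

theorem fRec_succ (k : Int) (red : List Int) (m : Nat) :
    fRec k red (m + 1) = fV k red (m + 1) :: fRec k red m := rfl

theorem fRec_getElem? (k : Int) (red : List Int) (m t : Nat) (h : t ≤ m) :
    (fRec k red m)[t]? = some (fV k red (m - t)) := by
  induction m generalizing t with
  | zero => interval_cases t <;> rfl
  | succ m ih =>
    rw [fRec_succ]
    cases t with
    | zero => simp
    | succ t => simpa using ih t (by omega)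

theorem gv_natCast (k : Int) (red : List Int) (m : Nat) : gv k red (m : Int) = fV k red m := by
  simp [gv]

theorem gSum_nonpos (k : Int) (red : List Int) (a : Int) (ha : a ≤ 0) (u : Nat) :
    gSum k red a u = 0 := by
  induction u with
  | zero => rfl
  | succ u ih => simp [gSum, ih, gv]; omega

theorem gSum_shift (k : Int) (red : List Int) (a : Int) (u : Nat) (hu : 1 ≤ u) :
    gSum k red (a + 1) u = gv k red a + gSum k red a u - gv k red (a - u) := by
  induction u with
  | zero => omega
  | succ u ih =>
    rcases Nat.eq_or_lt_of_le hu with h1 | h1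
    · have : u = 0 := by omega
      subst this
      simp [gSum]
    · have ihu := ih (by omega)
      simp only [gSum]
      rw [ihu]
      have : a + 1 - (↑u + 1) = a - u := by ring
      rw [this]
      push_cast
      ring_nf

theorem gSum_eq_take_sum (k : Int) (red : List Int) (m : Nat) (u : Nat) :
    gSum k red ((m : Int) + 1) u = ((fRec k red m).take u).sum := by
  induction u with
  | zero => simp [gSum]
  | succ u ih =>
    simp only [gSum, ih]
    by_cases h : u < m + 1
    · have h2 : u < (fRec k red m).length := by rw [fRec_length]; omega
      have hget : (fRec k red m)[u]'h2 = fV k red (m - u) := by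
        have := fRec_getElem? k red m u (by omega)
        rw [List.getElem?_eq_getElem h2] at this
        exact Option.some.inj this
      rw [List.sum_take_succ _ _ h2, hget]
      congr 1
      have : (m : Int) + 1 - (u + 1) = ((m - u : Nat) : Int) := by push_cast; omega
      rw [this, gv_natCast]
    · have hlen : (fRec k red m).length ≤ u := by rw [fRec_length]; omega
      rw [List.take_of_length_le hlen, List.take_of_length_le (by omega)]
      have : gv k red ((m : Int) + 1 - (u + 1)) = 0 := by
        simp only [gv, if_pos]; push_cast; omega
      rw [this, add_zero]

theorem emod_ne_of_not_dvd (k x y : Int) (hk : 0 < k) (h : ¬ k ∣ (x - y)) :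
    x % k ≠ y % k := by
  intro he
  apply h
  apply Int.dvd_of_emod_eq_zero
  rw [Int.sub_emod, he, sub_self, Int.zero_emod]

-- helpers on getD / set
theorem getD_set_self (l : List Int) (p : Nat) (v : Int) (h : p < l.length) :
    (l.set p v).getD p 0 = v := by
  rw [List.getD_eq_getElem?_getD, List.getElem?_set_self' , List.getElem?_eq_getElem h]
  rfl

theorem getD_set_ne (l : List Int) (p q : Nat) (v : Int) (h : p ≠ q) :
    (l.set p v).getD q 0 = l.getD q 0 := by
  rw [List.getD_eq_getElem?_getD, List.getElem?_set_ne h, ← List.getD_eq_getElem?_getD]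

theorem getD_replicate_zero (m p : Nat) : (List.replicate m (0 : Int)).getD p 0 = 0 := by
  rw [List.getD_eq_getElem?_getD]
  by_cases h : p < m
  · simp [List.getElem?_replicate, h]
  · rw [List.getElem?_eq_none (by simpa using h)]; rfl

-- A-side invariant: dp is a ring buffer of the last k values of f
def invA (k : Int) (red : List Int) (i : Int) (dp : List Int) : Prop :=
  dp.length = k.toNat ∧
  ∀ t : Nat, t < k.toNat → dp.getD ((i - t) % k).toNat 0 = gv k red (i - t)

theorem pyGetD_toNat (xs : List Int) (i : Int) (h : 0 ≤ i) :
    PySem.List.pyGetD xs i 0 = xs.getD i.toNat 0 := by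
  have h2 := PySem.List.pyGetD_natCast xs i.toNat (0 : Int)
  rw [Int.toNat_of_nonneg h] at h2
  exact h2

theorem set_getD_self (l : List Int) (p : Nat) (h : p < l.length) :
    l.set p (l.getD p 0) = l := by
  rw [List.getD_eq_getElem?_getD, List.getElem?_eq_getElem h]
  simpa using List.set_getElem_self h

theorem fV_succ (k : Int) (red : List Int) (m : Nat) :
    fV k red (m + 1) = if red.contains (m : Int) then 0 else ((fRec k red m).take k.toNat).sum := rfl

theorem take_one_sum_fRec (k : Int) (red : List Int) (m : Nat) :
    ((fRec k red m).take 1).sum = fV k red m := by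
  cases m with
  | zero => simp [fRec, fV]
  | succ m => rw [fRec_succ]; simp

theorem invA_zero (k : Int) (red : List Int) (hk : 1 ≤ k) :
    invA k red 0 ((List.replicate k.toNat 0).set 0 1) := by
  have hk0 : (0 : Int) < k := by omega
  constructor
  · simp
  · intro t ht
    rcases Nat.eq_zero_or_pos t with h0 | h0
    · subst h0
      simp only [Nat.cast_zero, sub_zero, Int.zero_emod, Int.toNat_zero]
      rw [getD_set_self _ _ _ (by simp; omega)]
      simp [gv, fV, fRec]
    · have hnd : ¬ k ∣ ((0 - (t : Int)) - 0) := by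
        intro hd
        have hd2 : k ∣ (t : Int) := by
          rw [sub_zero, zero_sub] at hd
          exact (dvd_neg).mp hd
        have := Int.le_of_dvd (by omega) hd2
        omega
      have hs := emod_ne_of_not_dvd k (0 - (t : Int)) 0 hk0 hnd
      rw [Int.zero_emod] at hs
      have hnn : 0 ≤ (0 - (t : Int)) % k := Int.emod_nonneg _ (by omega)
      have htn : ((0 - (t : Int)) % k).toNat ≠ 0 := by omega
      rw [getD_set_ne _ _ _ _ (Ne.symm htn), getD_replicate_zero]
      have hlt : (0 : Int) - (t : Int) < 0 := by omega
      unfold gv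
      rw [if_pos hlt]

theorem innerA_red_keep (red : List Int) (k a : Int) (dp : List Int) (hk : 1 ≤ k)
    (hred : red.contains (a - 1) = true) (l : List Int) :
    l.foldl (innerA red k a) (dp.set (a % k).toNat 0) = dp.set (a % k).toNat 0 := by
  have hk0 : (0 : Int) < k := by omega
  induction l with
  | nil => rfl
  | cons j l ih =>
    rw [List.foldl_cons]
    have hstep : innerA red k a (dp.set (a % k).toNat 0) j = dp.set (a % k).toNat 0 := by
      unfold innerA
      by_cases hj : a - j < 0
      · rw [if_pos hj]
      · rw [if_neg hj, if_pos hred, PySem.Int.mod_eq_emod_of_pos hk0,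
            PySem.List.pySetD_of_nonneg _ _ (Int.emod_nonneg _ (by omega)), List.set_set]
    rw [hstep, ih]

theorem outerA_red (red : List Int) (k a : Int) (dp : List Int) (hk : 2 ≤ k) (ha : 1 ≤ a)
    (hred : red.contains (a - 1) = true) :
    outerA red k dp a = dp.set (a % k).toNat 0 := by
  have hk0 : (0 : Int) < k := by omega
  unfold outerA
  rw [PySem.List.pyRange_one_cons (by omega : (1 : Int) < k), List.foldl_cons]
  have hfirst : innerA red k a dp 1 = dp.set (a % k).toNat 0 := by
    unfold innerA
    rw [if_neg (by omega), if_pos hred, PySem.Int.mod_eq_emod_of_pos hk0,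
        PySem.List.pySetD_of_nonneg _ _ (Int.emod_nonneg _ (by omega))]
  rw [hfirst, innerA_red_keep red k a dp (by omega) hred]

theorem innerA_nonred_partial (red : List Int) (k a : Int) (dp : List Int) (hk : 2 ≤ k) (ha : 1 ≤ a)
    (hlen : dp.length = k.toNat) (hred : red.contains (a - 1) = false) (u : Nat) (hu : u + 1 ≤ k.toNat) :
    (PySem.List.pyRange 1 (1 + (u : Int)) 1).foldl (innerA red k a) dp =
      dp.set (a % k).toNat (dp.getD (a % k).toNat 0 + sAcc dp a k u) := by
  have hk0 : (0 : Int) < k := by omega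
  have hidx : (a % k).toNat < dp.length := by
    rw [hlen]
    have := Int.emod_nonneg a (by omega : k ≠ 0)
    have := Int.emod_lt_of_pos a hk0
    omega
  induction u with
  | zero =>
    rw [show (1 : Int) + ((0 : Nat) : Int) = 1 by norm_num,
        PySem.List.pyRange_one_eq_nil (le_refl 1)]
    simp only [List.foldl_nil, sAcc, add_zero]
    exact (set_getD_self dp _ hidx).symm
  | succ u ih =>
    have hrange : PySem.List.pyRange 1 (1 + ((u + 1 : Nat) : Int)) 1 =
        PySem.List.pyRange 1 (1 + (u : Int)) 1 ++ [1 + (u : Int)] := by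
      have h1 : (1 : Int) + ((u + 1 : Nat) : Int) = (1 + (u : Int)) + 1 := by push_cast; ring
      rw [h1, PySem.List.pyRange_one_succ_right (by omega)]
    rw [hrange, List.foldl_append, ih (by omega), List.foldl_cons, List.foldl_nil]
    set w := dp.getD (a % k).toNat 0 + sAcc dp a k u with hw
    unfold innerA
    by_cases hneg : a - (1 + (u : Int)) < 0
    · rw [if_pos hneg]
      have hs : sAcc dp a k (u + 1) = sAcc dp a k u := by
        simp only [sAcc]
        rw [if_pos (by push_cast; omega), add_zero]
      rw [hs]
    · rw [if_neg hneg, if_neg (by rw [hred]; exact Bool.false_ne_true), PySem.Int.mod_eq_emod_of_pos hk0,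
          PySem.Int.mod_eq_emod_of_pos hk0]
      have hne : (a - (1 + (u : Int))) % k ≠ a % k := by
        apply emod_ne_of_not_dvd k _ _ hk0
        intro hd
        have hdvd : k ∣ (1 + (u : Int)) := by
          have he : a - (1 + (u : Int)) - a = -(1 + (u : Int)) := by ring
          rw [he] at hd
          exact (dvd_neg).mp hd
        have := Int.le_of_dvd (by omega) hdvd
        omega
      have hnn1 : 0 ≤ (a - (1 + (u : Int))) % k := Int.emod_nonneg _ (by omega)
      have hnn2 : 0 ≤ a % k := Int.emod_nonneg _ (by omega)
      rw [PySem.List.pySetD_of_nonneg _ _ hnn2, List.set_set]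
      rw [pyGetD_toNat _ _ hnn2, pyGetD_toNat _ _ hnn1]
      rw [getD_set_self _ _ _ hidx]
      rw [getD_set_ne _ _ _ _ (fun hcon => hne (by omega))]
      congr 1
      simp only [sAcc]
      rw [if_neg (by push_cast; omega), PySem.Int.mod_eq_emod_of_pos hk0,
          pyGetD_toNat _ _ (Int.emod_nonneg _ (by omega))]
      have harg : a - ((u : Int) + 1) = a - (1 + (u : Int)) := by ring
      rw [harg, add_assoc]

theorem sAcc_eq_gSum (red : List Int) (k : Int) (i : Nat) (dp : List Int) (hk : 1 ≤ k)
    (inv : invA k red (i : Int) dp) (u : Nat) (hu : u + 1 ≤ k.toNat) :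
    sAcc dp ((i : Int) + 1) k u = gSum k red ((i : Int) + 1) u := by
  have hk0 : (0 : Int) < k := by omega
  induction u with
  | zero => rfl
  | succ u ih =>
    unfold sAcc gSum
    rw [ih (by omega)]
    congr 1
    have harg : (i : Int) + 1 - ((u : Int) + 1) = (i : Int) - (u : Int) := by ring
    by_cases hneg : (i : Int) + 1 - ((u + 1 : Nat) : Int) < 0
    · rw [if_pos (by push_cast at hneg ⊢; omega)]
      unfold gv
      rw [if_pos (by push_cast at hneg ⊢; omega)]
    · rw [if_neg (by push_cast at hneg ⊢; omega), PySem.Int.mod_eq_emod_of_pos hk0]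
      rw [pyGetD_toNat _ _ (Int.emod_nonneg _ (by omega))]
      have := inv.2 u (by omega)
      rw [show ((i : Int) + 1 - ((u : Int) + 1)) = (i : Int) - (u : Int) by ring]
      exact this

-- setting slot (i+1) % k to f (i+1) preserves the ring-buffer invariant
theorem invA_set (red : List Int) (k : Int) (i : Nat) (dp : List Int) (hk0 : (0 : Int) < k)
    (inv : invA k red (i : Int) dp) (v : Int) (hv : v = gv k red ((i : Int) + 1)) :
    invA k red ((i : Int) + 1) (dp.set (((((i : Int) + 1) % k)).toNat) v) := by
  have hidx : ((((i : Int) + 1) % k)).toNat < dp.length := by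
    rw [inv.1]
    have := Int.emod_nonneg ((i : Int) + 1) (by omega : k ≠ 0)
    have := Int.emod_lt_of_pos ((i : Int) + 1) hk0
    omega
  constructor
  · rw [List.length_set, inv.1]
  · intro t ht
    rcases Nat.eq_zero_or_pos t with h0 | h0
    · subst h0
      rw [show ((i : Int) + 1 - ((0 : Nat) : Int)) = (i : Int) + 1 by push_cast; ring]
      rw [getD_set_self _ _ _ hidx, hv]
    · have hne : ((i : Int) + 1 - (t : Int)) % k ≠ ((i : Int) + 1) % k := by
        apply emod_ne_of_not_dvd k _ _ hk0
        intro hd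
        have h2 : k ∣ (t : Int) := by
          rw [show (i : Int) + 1 - (t : Int) - ((i : Int) + 1) = -(t : Int) by ring] at hd
          exact (dvd_neg).mp hd
        have := Int.le_of_dvd (by omega) h2
        omega
      have hnn1 : 0 ≤ ((i : Int) + 1 - (t : Int)) % k := Int.emod_nonneg _ (by omega)
      have hnn2 : 0 ≤ ((i : Int) + 1) % k := Int.emod_nonneg _ (by omega)
      rw [getD_set_ne _ _ _ _ (fun hcon => hne (by omega))]
      have h1 := inv.2 (t - 1) (by omega)
      rw [show ((i : Int) - ((t - 1 : Nat) : Int)) = (i : Int) + 1 - (t : Int) by push_cast; omega] at h1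
      exact h1

theorem invA_step (red : List Int) (k : Int) (i : Nat) (dp : List Int) (hk : 2 ≤ k)
    (inv : invA k red (i : Int) dp) :
    invA k red ((i : Int) + 1) (outerA red k dp ((i : Int) + 1)) := by
  have hk0 : (0 : Int) < k := by omega
  have ha : (1 : Int) ≤ (i : Int) + 1 := by omega
  have hfv : gv k red ((i : Int) + 1) = fV k red (i + 1) := by
    rw [show ((i : Int) + 1) = ((i + 1 : Nat) : Int) by push_cast; ring, gv_natCast]
  have hred_arg : ((i : Int) + 1) - 1 = (i : Int) := by ring
  by_cases hred : red.contains ((i : Int) + 1 - 1) = true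
  · rw [outerA_red red k ((i : Int) + 1) dp hk ha hred]
    apply invA_set red k i dp hk0 inv 0
    rw [hfv, fV_succ, if_pos (by rwa [hred_arg] at hred)]
  · rw [show outerA red k dp ((i : Int) + 1) =
        dp.set ((((i : Int) + 1) % k)).toNat
          (dp.getD ((((i : Int) + 1) % k)).toNat 0 + sAcc dp ((i : Int) + 1) k (k.toNat - 1)) from ?_]
    · apply invA_set red k i dp hk0 inv
      have hgetD : dp.getD ((((i : Int) + 1) % k)).toNat 0 = gv k red ((i : Int) + 1 - k) := by
        have h1 := inv.2 (k.toNat - 1) (by omega)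
        have harg : (i : Int) - ((k.toNat - 1 : Nat) : Int) = (i : Int) + 1 - k := by
          push_cast; omega
        rw [harg] at h1
        have hmod : ((i : Int) + 1 - k) % k = ((i : Int) + 1) % k := by
          rw [show (i : Int) + 1 - k = ((i : Int) + 1) + k * (-1) by ring,
              Int.add_mul_emod_self_left]
        rw [hmod] at h1
        exact h1
      rw [hgetD, sAcc_eq_gSum red k i dp (by omega) inv (k.toNat - 1) (by omega)]
      have hsum : gv k red ((i : Int) + 1 - k) + gSum k red ((i : Int) + 1) (k.toNat - 1) =
          gSum k red ((i : Int) + 1) k.toNat := by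
        obtain ⟨u0, hu0⟩ : ∃ u0, k.toNat = u0 + 1 := ⟨k.toNat - 1, by omega⟩
        rw [hu0, show u0 + 1 - 1 = u0 from rfl]
        simp only [gSum]
        rw [show ((i : Int) + 1) - (((u0 : Nat) : Int) + 1) = (i : Int) + 1 - k by
              push_cast; omega]
        ring
      rw [hsum, gSum_eq_take_sum, hfv, fV_succ,
          if_neg (by rwa [hred_arg] at hred)]
    · have hcast : (1 : Int) + ((k.toNat - 1 : Nat) : Int) = k := by push_cast; omega
      have := innerA_nonred_partial red k ((i : Int) + 1) dp hk ha inv.1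
        ((Bool.not_eq_true _).mp hred) (k.toNat - 1) (by omega)
      rw [hcast] at this
      unfold outerA
      exact this

theorem invA_loop (red : List Int) (k : Int) (hk : 2 ≤ k) (N : Nat) :
    invA k red (N : Int)
      ((PySem.List.pyRange 1 ((N : Int) + 1) 1).foldl (outerA red k)
        ((List.replicate k.toNat 0).set 0 1)) := by
  induction N with
  | zero =>
    rw [show ((0 : Nat) : Int) + 1 = 1 by norm_num,
        PySem.List.pyRange_one_eq_nil (le_refl 1), List.foldl_nil]
    exact invA_zero k red (by omega)
  | succ N ih =>
    have hrange : PySem.List.pyRange 1 (((N + 1 : Nat) : Int) + 1) 1 =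
        PySem.List.pyRange 1 ((N : Int) + 1) 1 ++ [(N : Int) + 1] := by
      rw [show ((N + 1 : Nat) : Int) + 1 = ((N : Int) + 1) + 1 by push_cast; ring,
          PySem.List.pyRange_one_succ_right (by omega)]
    rw [hrange, List.foldl_append, List.foldl_cons, List.foldl_nil]
    have := invA_step red k N _ hk ih
    rwa [show ((N + 1 : Nat) : Int) = (N : Int) + 1 by push_cast; ring]

theorem A_eq_fV (red : List Int) (k : Int) (hk : 2 ≤ k) (N : Nat) :
    climb_stairs_k_red (N : Int) k red = fV k red N := by
  have hk0 : (0 : Int) < k := by omega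
  unfold climb_stairs_k_red
  simp only [PySem.List.pyRepeat_singleton]
  have hinit : PySem.List.pySetD (List.replicate k.toNat (0 : Int)) 0 1 =
      (List.replicate k.toNat 0).set 0 1 := by
    rw [PySem.List.pySetD_of_nonneg _ _ (by omega : (0 : Int) ≤ 0)]; rfl
  rw [hinit]
  have hinv := invA_loop red k hk N
  rw [PySem.Int.mod_eq_emod_of_pos hk0, pyGetD_toNat _ _ (Int.emod_nonneg _ (by omega))]
  have h0 := hinv.2 0 (by omega)
  rw [show ((N : Int) - ((0 : Nat) : Int)) = (N : Int) by push_cast; ring] at h0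
  rw [h0, gv_natCast]

theorem A_k_one (red : List Int) (n : Int) (hn : 0 ≤ n) :
    climb_stairs_k_red n 1 red = 1 := by
  unfold climb_stairs_k_red
  have houter : ∀ (l : List Int) (s : List Int), l.foldl (outerA red 1) s = s := by
    intro l
    induction l with
    | nil => intro s; rfl
    | cons x l ih =>
      intro s
      rw [List.foldl_cons]
      have : outerA red 1 s x = s := by
        unfold outerA
        rw [PySem.List.pyRange_one_eq_nil (le_refl 1), List.foldl_nil]
      rw [this, ih]
  simp only [houter]
  rw [PySem.Int.mod_eq_emod_of_pos (by omega), Int.emod_one]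
  decide

-- B-side helpers
theorem ways_getD (k : Int) (red : List Int) (i N p : Nat) (hp : p ≤ i) :
    ((fRec k red i).reverse ++ List.replicate (N - i) (0 : Int)).getD p 0 = fV k red p := by
  have hlen : (fRec k red i).reverse.length = i + 1 := by
    rw [List.length_reverse, fRec_length]
  have hp1 : p < (fRec k red i).reverse.length := by omega
  rw [List.getD_eq_getElem?_getD, List.getElem?_append_left hp1, List.getElem?_eq_getElem hp1]
  rw [List.getElem_reverse]
  have h2 : (fRec k red i).length - 1 - p = i - p := by rw [fRec_length]; omega
  have h3 := fRec_getElem? k red i (i - p) (by omega)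
  rw [List.getElem?_eq_getElem (by rw [fRec_length]; omega)] at h3
  have h4 : (fRec k red i)[(fRec k red i).length - 1 - p]'(by rw [fRec_length]; omega) =
      fV k red (i - (i - p)) := by
    simp_rw [h2]
    exact Option.some.inj h3
  rw [h4, show i - (i - p) = p by omega]
  rfl

theorem set_append_len (l1 l2 : List Int) (v : Int) :
    (l1 ++ l2).set l1.length v = l1 ++ l2.set 0 v := by
  induction l1 with
  | nil => rfl
  | cons a t ih => simp [ih]

theorem set_contains_ofList (red : List Int) (x : Int) :
    PySem.Set.contains (PySem.Set.ofList red) x = red.contains x := by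
  rw [Bool.eq_iff_iff, PySem.Set.contains_iff, PySem.Set.mem_ofList]
  exact (List.contains_iff_mem).symm

-- B-side invariant and loop
theorem B_loop (red : List Int) (k : Int) (hk : 1 ≤ k) (N : Nat) (i : Nat) (hi : i ≤ N) :
    ((PySem.List.pyRange 1 ((i : Int) + 1) 1).foldl (stepB (PySem.Set.ofList red) k)
        ((List.replicate (N + 1) 0).set 0 1, 0)).1 =
      (fRec k red i).reverse ++ List.replicate (N - i) 0 ∧
    ((PySem.List.pyRange 1 ((i : Int) + 1) 1).foldl (stepB (PySem.Set.ofList red) k)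
        ((List.replicate (N + 1) 0).set 0 1, 0)).2 = gSum k red (i : Int) k.toNat := by
  have hk0 : (0 : Int) < k := by omega
  induction i with
  | zero =>
    rw [show ((0 : Nat) : Int) + 1 = 1 by norm_num,
        PySem.List.pyRange_one_eq_nil (le_refl 1), List.foldl_nil]
    constructor
    · show (List.replicate (N + 1) (0 : Int)).set 0 1 =
        (fRec k red 0).reverse ++ List.replicate (N - 0) 0
      rw [List.replicate_succ, List.set_cons_zero]
      simp [fRec]
    · exact (gSum_nonpos k red _ (by norm_num) k.toNat).symm
  | succ i ih =>
    have hiN : i ≤ N := by omega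
    obtain ⟨h1, h2⟩ := ih hiN
    have hrange : PySem.List.pyRange 1 (((i + 1 : Nat) : Int) + 1) 1 =
        PySem.List.pyRange 1 ((i : Int) + 1) 1 ++ [(i : Int) + 1] := by
      rw [show ((i + 1 : Nat) : Int) + 1 = ((i : Int) + 1) + 1 by push_cast; ring,
          PySem.List.pyRange_one_succ_right (by omega)]
    rw [hrange, List.foldl_append, List.foldl_cons, List.foldl_nil]
    have hst : (PySem.List.pyRange 1 ((i : Int) + 1) 1).foldl (stepB (PySem.Set.ofList red) k)
        ((List.replicate (N + 1) 0).set 0 1, 0) =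
        ((fRec k red i).reverse ++ List.replicate (N - i) 0, gSum k red (i : Int) k.toNat) :=
      Prod.ext h1 h2
    rw [hst]
    set W := (fRec k red i).reverse ++ List.replicate (N - i) (0 : Int) with hWdef
    -- the two reads from the dp array
    have hget1 : PySem.List.pyGetD W ((i : Nat) : Int) 0 = fV k red i := by
      rw [PySem.List.pyGetD_natCast]
      exact ways_getD k red i N i (le_refl i)
    -- the updated window equals gSum (i+1) k
    have hcastk : ((k.toNat : Nat) : Int) = k := Int.toNat_of_nonneg (by omega)
    have hshift := gSum_shift k red (i : Int) k.toNat (by omega)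
    have hwin : (if 0 ≤ (i : Int) + 1 - k - 1 then
          gSum k red (i : Int) k.toNat + PySem.List.pyGetD W ((i : Nat) : Int) 0 -
            PySem.List.pyGetD W ((i : Int) + 1 - k - 1) 0
        else gSum k red (i : Int) k.toNat + PySem.List.pyGetD W ((i : Nat) : Int) 0) =
        gSum k red ((i : Int) + 1) k.toNat := by
      rw [hget1, hshift, hcastk]
      by_cases hsub : 0 ≤ (i : Int) + 1 - k - 1
      · rw [if_pos hsub]
        have harg : (i : Int) + 1 - k - 1 = (i : Int) - k := by ring
        rw [harg, pyGetD_toNat _ _ (by omega)]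
        rw [ways_getD k red i N (((i : Int) - k).toNat) (by omega)]
        have hgv : gv k red ((i : Int) - k) = fV k red (((i : Int) - k).toNat) := by
          unfold gv
          rw [if_neg (by omega)]
        rw [hgv, gv_natCast]
        ring
      · rw [if_neg hsub]
        have hgv : gv k red ((i : Int) - k) = 0 := by
          unfold gv
          rw [if_pos (by omega)]
        rw [hgv, gv_natCast]
        ring
    -- writing position i+1
    have hsetarg : ((i : Int) + 1).toNat = i + 1 := by omega
    have hlenW : (fRec k red i).reverse.length = i + 1 := by
      rw [List.length_reverse, fRec_length]
    have hset : ∀ v : Int, PySem.List.pySetD W ((i : Int) + 1) v =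
        (fRec k red i).reverse ++ v :: List.replicate (N - (i + 1)) 0 := by
      intro v
      rw [PySem.List.pySetD_of_nonneg _ _ (by omega), hsetarg, hWdef,
          show i + 1 = (fRec k red i).reverse.length from hlenW.symm, set_append_len,
          show N - i = (N - (i + 1)) + 1 by omega, List.replicate_succ, List.set_cons_zero,
          hlenW]
    have hrev : ∀ v : Int, v = fV k red (i + 1) →
        (fRec k red i).reverse ++ v :: List.replicate (N - (i + 1)) 0 =
        (fRec k red (i + 1)).reverse ++ List.replicate (N - (i + 1)) 0 := by
      intro v hv
      rw [hv, fRec_succ, List.reverse_cons, List.append_assoc, List.singleton_append]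
    have hcast2 : ((i + 1 : Nat) : Int) = (i : Int) + 1 := by push_cast; ring
    -- now compute the step
    unfold stepB
    simp only []
    rw [show ((i : Int) + 1 - 1) = ((i : Nat) : Int) by ring, set_contains_ofList, hcast2]
    by_cases hc : red.contains ((i : Nat) : Int) = true
    · rw [if_pos hc]
      exact ⟨by rw [hset 0, hrev 0 (by rw [fV_succ, if_pos hc])], hwin⟩
    · rw [if_neg hc]
      have hval : (if 0 ≤ (i : Int) + 1 - k - 1 then
            gSum k red (i : Int) k.toNat + PySem.List.pyGetD W ((i : Nat) : Int) 0 -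
              PySem.List.pyGetD W ((i : Int) + 1 - k - 1) 0
          else gSum k red (i : Int) k.toNat + PySem.List.pyGetD W ((i : Nat) : Int) 0) =
          fV k red (i + 1) := by
        rw [hwin, gSum_eq_take_sum, fV_succ, if_neg hc]
      exact ⟨by rw [hset _, hrev _ hval], hwin⟩

theorem B_eq_fV (red : List Int) (k : Int) (hk : 1 ≤ k) (N : Nat) :
    climb_stairs_k_red_alt (N : Int) k red = fV k red N := by
  unfold climb_stairs_k_red_alt
  simp only [PySem.List.pyRepeat_singleton]
  have hcast : ((N : Int) + 1).toNat = N + 1 := by omega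
  rw [hcast]
  have hinit : PySem.List.pySetD (List.replicate (N + 1) (0 : Int)) 0 1 =
      (List.replicate (N + 1) (0 : Int)).set 0 1 := by
    rw [PySem.List.pySetD_of_nonneg _ _ (by omega : (0 : Int) ≤ 0)]; rfl
  rw [hinit]
  have hloop := (B_loop red k hk N N (le_refl N)).1
  rw [hloop, PySem.List.pyGetD_natCast]
  have := ways_getD k red N N N (le_refl N)
  simpa using this

theorem fV_one_of_no_red (red : List Int) (n : Int) (N : Nat) (hN : (N : Int) ≤ n)
    (h : ∀ r ∈ red, ¬(0 ≤ r ∧ r < n)) : ∀ i ≤ N, fV 1 red i = 1 := by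
  intro i
  induction i with
  | zero => intro _; simp [fV, fRec]
  | succ i ih =>
    intro hiN
    have hc : red.contains ((i : Nat) : Int) = false := by
      by_contra hcc
      have hmem : ((i : Nat) : Int) ∈ red := by
        have := (Bool.not_eq_false _).mp hcc
        exact List.contains_iff_mem.mp this
      exact h _ hmem ⟨by omega, by omega⟩
    rw [fV_succ, if_neg (by rw [hc]; exact Bool.false_ne_true)]
    rw [show (1 : Int).toNat = 1 from rfl, take_one_sum_fRec]
    exact ih (by omega)

theorem fV_zero_of_red (red : List Int) (i : Nat)
    (h : ∃ r ∈ red, 0 ≤ r ∧ r < (i : Int)) : fV 1 red i = 0 := by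
  induction i with
  | zero =>
    obtain ⟨r, _, hr0, hrn⟩ := h
    omega
  | succ i ih =>
    by_cases hc : red.contains ((i : Nat) : Int) = true
    · rw [fV_succ, if_pos hc]
    · rw [fV_succ, if_neg hc, show (1 : Int).toNat = 1 from rfl, take_one_sum_fRec]
      apply ih
      obtain ⟨r, hmem, hr0, hrn⟩ := h
      refine ⟨r, hmem, hr0, ?_⟩
      have hne : r ≠ ((i : Nat) : Int) := by
        intro he
        exact hc (List.contains_iff_mem.mpr (he ▸ hmem))
      push_cast at hrn ⊢
      omega

-- ===== VERDICT (by name: the statement is the Claim_ definition above) =====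
theorem climb_stairs_k_red_spec : Claim_unchanged_climb_stairs_k_red := by
  intro n k red _ hpre
  unfold Spec_climb_stairs_k_red
  intro hnd
  obtain ⟨hn, hk⟩ := hpre
  have hnN : n = ((n.toNat : Nat) : Int) := (Int.toNat_of_nonneg hn).symm
  by_cases hk1 : k = 1
  · subst hk1
    rw [hnN, A_k_one red _ (by omega), B_eq_fV red 1 (le_refl 1)]
    have hno : ∀ r ∈ red, ¬(0 ≤ r ∧ r < ((n.toNat : Nat) : Int)) := by
      intro r hmem hr
      exact hnd ⟨rfl, r, hmem, by omega, by omega⟩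
    exact (fV_one_of_no_red red _ n.toNat (le_refl _) hno n.toNat (le_refl _)).symm
  · rw [hnN, A_eq_fV red k (by omega) n.toNat, B_eq_fV red k (by omega) n.toNat]

theorem climb_stairs_k_red_changed : Claim_changed_climb_stairs_k_red := by
  unfold Claim_changed_climb_stairs_k_red; decide

theorem climb_stairs_k_red_tight : Claim_exact_climb_stairs_k_red := by
  intro n k red _ hpre hD
  obtain ⟨hn, hk⟩ := hpre
  obtain ⟨hk1, r, hmem, hr0, hrn⟩ := hD
  subst hk1
  have hnN : n = ((n.toNat : Nat) : Int) := (Int.toNat_of_nonneg hn).symm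
  rw [hnN, A_k_one red _ (by omega), B_eq_fV red 1 (le_refl 1),
      fV_zero_of_red red n.toNat ⟨r, hmem, hr0, by omega⟩]
  norm_num
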